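-- pv_equiv track=rewrite | github.com/smsxgz/euler_project | problems/problems@101~200/problem_105/Special_subset_sums_testing.py | helper
-- ===== SOURCE A (Python) =====
-- def helper(path):
--
--     k = (len(path) - 1) // 2
--     s = path[0]
--     for i in range(1, k + 1):
--         s += path[i] - path[-i]
--         if s <= 0:
--             return False
--     return True
-- ===== SOURCE B (Python) =====
-- def helper(path):
--     k = (len(path) - 1) // 2
--     lows = []
--     t = 0
--     for x in path:
--         t += x
--         lows.append(t)
--     highs = []
--     t = 0
--     for x in reversed(path):
--         t += x
--         highs.append(t)
--     return all(lows[i] > highs[i - 1] for i in range(1, k + 1))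
-- ===== Notes on version B (the rewrite author's own statement) =====
-- stated objective: alternative
-- what changed: B precomputes two cumulative-sum tables (prefix sums of the list and of its reverse) in two simple passes and then checks all(lows[i] > highs[i-1]) over the range, instead of A's single loop that maintains a running difference with an early return.
-- outside the precondition, e.g. on helper([]): A raises IndexError, B returns True
import Mathlib
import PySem

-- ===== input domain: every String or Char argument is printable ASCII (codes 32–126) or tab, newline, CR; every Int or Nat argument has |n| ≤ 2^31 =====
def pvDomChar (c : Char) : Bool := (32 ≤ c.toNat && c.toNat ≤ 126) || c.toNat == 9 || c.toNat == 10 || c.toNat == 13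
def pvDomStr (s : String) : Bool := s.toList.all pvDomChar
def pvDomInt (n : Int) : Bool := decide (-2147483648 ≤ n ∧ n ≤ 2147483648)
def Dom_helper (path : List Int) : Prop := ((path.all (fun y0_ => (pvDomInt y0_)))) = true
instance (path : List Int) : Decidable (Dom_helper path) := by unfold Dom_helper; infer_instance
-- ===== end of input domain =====

-- B replaces A's running-difference loop with two prefix-sum tables and an all-check; same O(n) cost.


-- ===== PORT A =====
-- the 'for i in range(1, k+1)' loop with the early 'return False'
def helperLoopA (path : List Int) : List Int → Int → Bool
  | [], _ => true
  | i :: rest, s =>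
    let s' := s + PySem.List.pyGetD path i 0 - PySem.List.pyGetD path (-i) 0
    if s' ≤ 0 then false else helperLoopA path rest s'

def helper (path : List Int) : Bool :=
  let k := PySem.Int.floordiv ((path.length : Int) - 1) 2
  let s := PySem.List.pyGetD path 0 0
  helperLoopA path (PySem.List.pyRange 1 (k + 1) 1) s

-- ===== PORT B =====
-- running-total append loop ('t += x; out.append(t)'), used for both tables
def prefixSums : List Int → Int → List Int
  | [], _ => []
  | x :: xs, t => (t + x) :: prefixSums xs (t + x)

def helper_alt (path : List Int) : Bool :=
  let k := PySem.Int.floordiv ((path.length : Int) - 1) 2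
  let lows := prefixSums path 0
  let highs := prefixSums path.reverse 0
  (PySem.List.pyRange 1 (k + 1) 1).all
    (fun i => decide (PySem.List.pyGetD lows i 0 > PySem.List.pyGetD highs (i - 1) 0))

-- ===== PRECONDITION & SPEC =====
-- A raises IndexError at 'path[0]' on the empty list; that is the only input excluded.
def Pre_helper (path : List Int) : Prop := path ≠ []
instance (path : List Int) : Decidable (Pre_helper path) := by unfold Pre_helper; infer_instance
def pvWitness_helper : List Int := [2, 3, 4]

def Spec_helper (path : List Int) (out : Bool) : Prop := out = helper_alt path
instance (path : List Int) (out : Bool) : Decidable (Spec_helper path out) := by unfold Spec_helper; infer_instance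

-- ===== CLAIM (what is proved, stated in full; the proofs are below) =====
def Claim_equal_helper : Prop := ∀ (path : List Int), Dom_helper path → Pre_helper path → Spec_helper path (helper path)

-- ===== LEMMAS AND PROOFS =====

lemma prefixSums_length (xs : List Int) (t : Int) : (prefixSums xs t).length = xs.length := by
  induction xs generalizing t with
  | nil => rfl
  | cons x xs ih => simp [prefixSums, ih]

lemma prefixSums_getElem (xs : List Int) (t : Int) (j : Nat) (h : j < xs.length) :
    (prefixSums xs t)[j]'(by rw [prefixSums_length]; exact h) = t + (xs.take (j + 1)).sum := by
  induction xs generalizing t j with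
  | nil => simp at h
  | cons x xs ih =>
    cases j with
    | zero => simp [prefixSums]
    | succ j =>
      simp only [prefixSums, List.getElem_cons_succ, List.take_succ_cons, List.sum_cons]
      rw [ih (t + x) j (by simpa using h)]
      ring

-- s' at step i equals lows[i] - highs[i-1]
lemma loop_invariant (path : List Int) (k : Int)
    (hk2 : 2 * k ≤ (path.length : Int) - 1) :
    ∀ (m : Nat) (i : Int), 1 ≤ i → i + m = k + 1 →
    helperLoopA path (PySem.List.pyRange i (k + 1) 1)
      ((path.take i.toNat).sum - (path.reverse.take (i - 1).toNat).sum)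
    = (PySem.List.pyRange i (k + 1) 1).all
        (fun j => decide (PySem.List.pyGetD (prefixSums path 0) j 0 >
                          PySem.List.pyGetD (prefixSums path.reverse 0) (j - 1) 0)) := by
  intro m
  induction m with
  | zero =>
    intro i _ him
    rw [PySem.List.pyRange_one_eq_nil (by omega)]
    rfl
  | succ m ih =>
    intro i hi him
    have hilt : i < k + 1 := by omega
    have hiN : i.toNat < path.length := by omega
    have hiN1 : 1 ≤ i.toNat := by omega
    rw [PySem.List.pyRange_one_cons hilt]
    -- rewrite the four indexings
    have hgetI : PySem.List.pyGetD path i 0 = path[i.toNat] :=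
      PySem.List.pyGetD_eq_getElem path 0 (by omega) (by omega)
    have hnegI : PySem.List.pyGetD path (-i) 0 = path[path.length - i.toNat] := by
      have : -i = -((i.toNat : Int)) := by omega
      rw [this, PySem.List.pyGetD_neg_natCast path i.toNat 0 (by omega) (by omega)]
    have hrev : path[path.length - i.toNat]'(by omega)
        = path.reverse[i.toNat - 1]'(by rw [List.length_reverse]; omega) := by
      rw [List.getElem_reverse]
      congr 1
      omega
    have hL : PySem.List.pyGetD (prefixSums path 0) i 0 = (path.take (i.toNat + 1)).sum := by
      rw [PySem.List.pyGetD_eq_getElem _ 0 (by omega)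
        (by rw [prefixSums_length]; omega)]
      rw [prefixSums_getElem path 0 i.toNat hiN]; ring
    have hH : PySem.List.pyGetD (prefixSums path.reverse 0) (i - 1) 0
        = (path.reverse.take i.toNat).sum := by
      have h1 : (i - 1).toNat < path.reverse.length := by simp; omega
      rw [PySem.List.pyGetD_eq_getElem _ 0 (by omega)
        (by rw [prefixSums_length]; omega)]
      rw [prefixSums_getElem path.reverse 0 (i - 1).toNat h1]
      have : (i - 1).toNat + 1 = i.toNat := by omega
      rw [this]; ring
    -- the updated accumulator is lows[i] - highs[i-1]
    have hstep :
        (path.take i.toNat).sum - (path.reverse.take (i - 1).toNat).sum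
          + PySem.List.pyGetD path i 0 - PySem.List.pyGetD path (-i) 0
        = (path.take (i.toNat + 1)).sum - (path.reverse.take i.toNat).sum := by
      rw [hgetI, hnegI, hrev]
      have hs1 : (path.take (i.toNat + 1)).sum = (path.take i.toNat).sum + path[i.toNat] := by
        rw [List.sum_take_succ]
      have hs2 : (path.reverse.take i.toNat).sum
          = (path.reverse.take (i.toNat - 1 + 1)).sum := by
        rw [Nat.sub_add_cancel hiN1]
      have hs3 : (path.reverse.take (i.toNat - 1 + 1)).sum
          = (path.reverse.take (i.toNat - 1)).sum + path.reverse[i.toNat - 1]'(by rw [List.length_reverse]; omega) := by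
        rw [List.sum_take_succ]
      have hs4 : (i - 1).toNat = i.toNat - 1 := by omega
      rw [hs1, hs2, hs3, hs4]
      ring
    simp only [helperLoopA, List.all_cons]
    rw [hstep, hL, hH]
    by_cases hle : (path.take (i.toNat + 1)).sum - (path.reverse.take i.toNat).sum ≤ 0
    · rw [if_pos hle]
      have : decide ((path.take (i.toNat + 1)).sum > (path.reverse.take i.toNat).sum) = false := by
        simp; omega
      rw [this]; rfl
    · rw [if_neg hle]
      have hd : decide ((path.take (i.toNat + 1)).sum > (path.reverse.take i.toNat).sum) = true := by
        simp; omega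
      rw [hd, Bool.true_and]
      have := ih (i + 1) (by omega) (by omega)
      have hcast : (i + 1).toNat = i.toNat + 1 := by omega
      have hcast2 : (i + 1 - 1).toNat = i.toNat := by omega
      rw [hcast, hcast2] at this
      exact this

lemma helper_eq_alt (path : List Int) (hne : path ≠ []) : helper path = helper_alt path := by
  obtain ⟨x, xs, rfl⟩ := List.exists_cons_of_ne_nil hne
  unfold helper helper_alt
  set n : Int := ((x :: xs).length : Int) with hn
  have hn1 : 1 ≤ n := by simp [hn]
  set k := PySem.Int.floordiv (n - 1) 2 with hkdef
  have hkd : k = (n - 1) / 2 := by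
    rw [hkdef, PySem.Int.floordiv_eq_ediv_of_pos (by norm_num)]
  have hk2 : 2 * k ≤ n - 1 := by rw [hkd]; omega
  have hinv := loop_invariant (x :: xs) k hk2 k.toNat 1 (by omega) (by omega)
  have h1 : ((1 : Int)).toNat = 1 := rfl
  have h0 : ((1 : Int) - 1).toNat = 0 := rfl
  rw [h1, h0] at hinv
  simpa [PySem.List.pyGetD_zero_cons] using hinv

-- ===== VERDICT (by name: the statement is the Claim_ definition above) =====
theorem helper_spec : Claim_equal_helper := by
  intro path _ hpre
  unfold Spec_helper
  exact helper_eq_alt path hpre
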